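-- pv_equiv track=rewrite | github.com/wonbeomjang/algorithm | 20061.py | drop_block
-- ===== SOURCE A (Python) =====
-- def drop_block(board, block):
--     r1, c1 = block[0]
--     r2, c2 = block[-1]
--     next_r1 = r1
--     next_r2 = r2
--     for i in range(10):
--         next_r1 = r1 + i
--         next_r2 = r2 + i
--
--         if next_r1 == 9 or next_r2 == 9 or board[next_r1 + 1][c1] or board[next_r2 + 1][c2]:
--             break
--
--
--     board[next_r1][c1] = 1
--     board[next_r2][c2] = 1
--
--     return board
-- ===== SOURCE B (Python) =====
-- def drop_block(board, block):
--     # Alternative decomposition: instead of stepping mutable next_r1/next_r2 through a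
--     # for-loop, compute the drop distance d by a recursive first-stop search and place
--     # both cells directly.  Mutates board in place like the original.
--     r1, c1 = block[0]
--     r2, c2 = block[-1]
--
--     def fall(d):
--         if r1 + d == 9 or r2 + d == 9 or board[r1 + d + 1][c1] or board[r2 + d + 1][c2] or d == 9:
--             return d
--         return fall(d + 1)
--
--     d = fall(0)
--     board[r1 + d][c1] = 1
--     board[r2 + d][c2] = 1
--     return board
-- ===== Notes on version B (the rewrite author's own statement) =====
-- stated objective: alternative
-- what changed: Replaces the for-loop that steps mutable next_r1/next_r2 in lockstep and breaks by a recursive first-stop search computing the drop distance d, which is then added to both cells directly.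
import Mathlib
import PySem

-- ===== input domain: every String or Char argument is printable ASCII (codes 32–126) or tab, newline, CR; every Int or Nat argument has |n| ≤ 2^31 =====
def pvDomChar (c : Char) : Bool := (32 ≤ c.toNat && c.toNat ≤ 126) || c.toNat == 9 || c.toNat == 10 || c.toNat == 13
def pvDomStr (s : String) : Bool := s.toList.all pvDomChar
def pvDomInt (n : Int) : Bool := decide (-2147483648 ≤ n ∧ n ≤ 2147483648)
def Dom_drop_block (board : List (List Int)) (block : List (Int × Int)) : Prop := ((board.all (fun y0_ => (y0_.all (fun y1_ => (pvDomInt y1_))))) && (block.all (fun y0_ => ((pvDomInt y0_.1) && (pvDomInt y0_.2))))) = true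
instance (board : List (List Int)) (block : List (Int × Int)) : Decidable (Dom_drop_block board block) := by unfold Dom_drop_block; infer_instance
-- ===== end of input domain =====

-- B replaces A's simultaneous stepping loop with mutable next_r1/next_r2 by a recursive
-- fall-distance search returning the drop d directly; like A, the Python B mutates `board`
-- in place (equivalence here is about the return value, which for both is the mutated board).

-- ===== PORT A =====
-- truthiness of board[r][c] (Python raises out of range; Pre_ keeps all probed indices in range)
def cellB (board : List (List Int)) (r c : Int) : Bool :=
  PySem.List.pyGetD (PySem.List.pyGetD board r []) c 0 != 0

-- board[r][c] = v
def setCell (board : List (List Int)) (r c : Int) (v : Int) : List (List Int) :=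
  PySem.List.pySetD board r (PySem.List.pySetD (PySem.List.pyGetD board r []) c v)

-- the `for i in range(10): … break` loop of A, carrying (next_r1, next_r2)
def dropGo (board : List (List Int)) (r1 c1 r2 c2 : Int) :
    List Int → Int × Int → Int × Int
  | [], st => st
  | i :: rest, _ =>
    let n1 := r1 + i
    let n2 := r2 + i
    if n1 == 9 || n2 == 9 || cellB board (n1 + 1) c1 || cellB board (n2 + 1) c2 then
      (n1, n2)
    else
      dropGo board r1 c1 r2 c2 rest (n1, n2)

def drop_block (board : List (List Int)) (block : List (Int × Int)) : List (List Int) :=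
  match PySem.List.pyGet? block 0, PySem.List.pyGet? block (-1) with
  | some (r1, c1), some (r2, c2) =>
    let st := dropGo board r1 c1 r2 c2 (PySem.List.pyRange 0 10 1) (r1, r2)
    setCell (setCell board st.1 c1 1) st.2 c2 1
  | _, _ => board   -- block[0] / block[-1] raised (block empty): excluded by Pre_

-- ===== PORT B =====
-- B-side truthiness of board[r][c] (same primitive expression as Source B writes)
def cellAlt (board : List (List Int)) (r c : Int) : Bool :=
  PySem.List.pyGetD (PySem.List.pyGetD board r []) c 0 != 0

-- B-side board[r][c] = v
def setCellAlt (board : List (List Int)) (r c : Int) (v : Int) : List (List Int) :=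
  PySem.List.pySetD board r (PySem.List.pySetD (PySem.List.pyGetD board r []) c v)

-- Source B's recursive `fall(d)`; the Nat argument is fuel making the recursion structural —
-- fall is entered at d = 0 with fuel 10, which covers d = 0..9, and the `d == 9` branch
-- stops the recursion before the fuel can run out, exactly as in Source B
def fallB (board : List (List Int)) (r1 c1 r2 c2 : Int) : Nat → Int → Int
  | 0, d => d
  | k + 1, d =>
    if r1 + d == 9 || r2 + d == 9 || cellAlt board (r1 + d + 1) c1 ||
        cellAlt board (r2 + d + 1) c2 || d == 9 then
      d
    else
      fallB board r1 c1 r2 c2 k (d + 1)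

def drop_block_alt (board : List (List Int)) (block : List (Int × Int)) : List (List Int) :=
  match block with
  | [] => board          -- block[0] raises IndexError on an empty block
  | p :: rest =>         -- r1, c1 = block[0]
    let q := (p :: rest).getLastD (0, 0)   -- r2, c2 = block[-1]: last element of a nonempty list (exact)
    let d := fallB board p.1 p.2 q.1 q.2 10 0
    setCellAlt (setCellAlt board (p.1 + d) p.2 1) (q.1 + d) q.2 1

-- ===== PRECONDITION & SPEC =====
-- Pre_ is exactly A's domain: a nonempty block and, spelled out index by index for the bounded
-- 10-step scan, that every board access Python dereferences — the probes below each cell until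
-- the first stop, and the two final placements — is a valid (possibly negative) Python index,
-- so no IndexError is raised.
def Pre_drop_block (board : List (List Int)) (block : List (Int × Int)) : Prop :=
  block ≠ [] ∧
  (let p := block.headD (0, 0)
   let q := block.getLastD (0, 0)
   let r1 := p.1; let c1 := p.2; let r2 := q.1; let c2 := q.2
   let n : Int := board.length
   let row : Int → List Int := fun j => PySem.List.pyGetD board j []
   let val : Int → Int → Prop := fun j c =>
     -n ≤ j ∧ j < n ∧ -((row j).length : Int) ≤ c ∧ c < ((row j).length : Int)
   let cell : Int → Int → Int := fun j c => PySem.List.pyGetD (row j) c 0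
   let stop : Int → Prop := fun i =>
     r1 + i = 9 ∨ r2 + i = 9 ∨ cell (r1 + i + 1) c1 ≠ 0 ∨ cell (r2 + i + 1) c2 ≠ 0
   (∀ i ∈ PySem.List.pyRange 0 10 1,
      (∀ j ∈ PySem.List.pyRange 0 10 1, j < i → ¬ stop j) →
        ((r1 + i = 9 ∨ r2 + i = 9) ∨
         (val (r1 + i + 1) c1 ∧ (cell (r1 + i + 1) c1 ≠ 0 ∨ val (r2 + i + 1) c2)))) ∧
   (∀ i ∈ PySem.List.pyRange 0 10 1,
      (stop i ∧ ∀ j ∈ PySem.List.pyRange 0 10 1, j < i → ¬ stop j) →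
        val (r1 + i) c1 ∧ val (r2 + i) c2) ∧
   ((∀ j ∈ PySem.List.pyRange 0 10 1, ¬ stop j) → val (r1 + 9) c1 ∧ val (r2 + 9) c2))
instance (board : List (List Int)) (block : List (Int × Int)) : Decidable (Pre_drop_block board block) := by unfold Pre_drop_block; infer_instance

def pvWitness_drop_block : List (List Int) × (List (Int × Int)) :=
  ([[0,0,0,0,0,0,0,0,0,0],[0,0,0,0,0,0,0,0,0,0],[0,0,0,0,0,0,0,0,0,0],
    [0,0,0,0,0,0,0,0,0,0],[0,0,0,0,0,0,0,0,0,0],[0,0,0,0,0,0,0,0,0,0],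
    [0,0,0,0,0,0,0,0,0,0],[0,0,0,0,0,0,0,0,0,0],[0,0,0,0,0,0,0,0,0,0],
    [0,0,0,0,0,0,0,0,0,0]], [(0, 3), (0, 4)])

def Spec_drop_block (board : List (List Int)) (block : List (Int × Int)) (out : List (List Int)) : Prop := out = drop_block_alt board block
instance (board : List (List Int)) (block : List (Int × Int)) (out : List (List Int)) : Decidable (Spec_drop_block board block out) := by unfold Spec_drop_block; infer_instance

-- ===== CLAIM (what is proved, stated in full; the proofs are below) =====
def Claim_equal_drop_block : Prop := ∀ (board : List (List Int)) (block : List (Int × Int)), Dom_drop_block board block → Pre_drop_block board block → Spec_drop_block board block (drop_block board block)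

-- ===== LEMMAS AND PROOFS =====

-- the two ports spell the same board primitives with their own names; they are definitionally equal
theorem cellAlt_eq (board : List (List Int)) (r c : Int) : cellAlt board r c = cellB board r c := rfl

theorem setCellAlt_eq (board : List (List Int)) (r c v : Int) :
    setCellAlt board r c v = setCell board r c v := rfl

-- A's loop over the tail range(a, 10) computes r + (Source B's fall a) in both components,
-- where the fuel k = 10 - a makes B's recursion structural
theorem dropGo_eq_fallB (board : List (List Int)) (r1 c1 r2 c2 : Int) :
    ∀ (k : Nat) (a : Int) (st : Int × Int), a + k = 10 → 0 ≤ a → a ≤ 9 →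
      dropGo board r1 c1 r2 c2 (PySem.List.pyRange a 10 1) st =
        (r1 + fallB board r1 c1 r2 c2 k a, r2 + fallB board r1 c1 r2 c2 k a) := by
  intro k
  induction k with
  | zero => intro a st h1 h2 h3; omega
  | succ k ih =>
    intro a st h1 h2 h3
    rw [PySem.List.pyRange_one_cons (by omega : a < 10)]
    by_cases hc : (r1 + a == 9 || r2 + a == 9 || cellB board (r1 + a + 1) c1 ||
        cellB board (r2 + a + 1) c2) = true
    · have hf : fallB board r1 c1 r2 c2 (k + 1) a = a := by
        simp only [fallB, cellAlt_eq]
        rw [if_pos (by simp only [Bool.or_eq_true] at hc ⊢; tauto)]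
      simp [dropGo, hc, hf]
    · by_cases ha : a = 9
      · -- last step: the loop runs out with state (r1+9, r2+9); fall returns 9 via `d == 9`
        subst ha
        have hf : fallB board r1 c1 r2 c2 (k + 1) 9 = 9 := by
          simp [fallB]
        simp [dropGo, hc, hf]
      · have h9 : (a == 9) = false := by simp; omega
        have hf : fallB board r1 c1 r2 c2 (k + 1) a = fallB board r1 c1 r2 c2 k (a + 1) := by
          simp only [fallB, cellAlt_eq, h9, Bool.or_false]
          rw [if_neg hc]
        simp only [dropGo, hc, Bool.false_eq_true, if_false, hf]
        exact ih (a + 1) _ (by omega) (by omega) (by omega)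

theorem pyGet?_head (p : Int × Int) (bs : List (Int × Int)) :
    PySem.List.pyGet? (p :: bs) 0 = some p := by
  simp [PySem.List.pyGet?, PySem.List.pyIdx?]

theorem pyGet?_last (p : Int × Int) (bs : List (Int × Int)) :
    PySem.List.pyGet? (p :: bs) (-1) = some ((p :: bs).getLastD (0, 0)) := by
  rw [PySem.List.pyGet?_neg_ofNat (p :: bs) 1 (by omega) (by simp)]
  simp [List.getLastD_eq_getLast?, List.getLast?_eq_getElem?]

-- ===== VERDICT (by name: the statement is the Claim_ definition above) =====
theorem drop_block_spec : Claim_equal_drop_block := by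
  intro board block _hdom hpre
  unfold Spec_drop_block
  cases block with
  | nil => exact absurd rfl hpre.1
  | cons p bs =>
    unfold drop_block drop_block_alt
    rw [pyGet?_head, pyGet?_last]
    simp only [dropGo_eq_fallB board p.1 p.2 ((p :: bs).getLastD (0, 0)).1
      ((p :: bs).getLastD (0, 0)).2 10 0 (p.1, ((p :: bs).getLastD (0, 0)).1)
      (by omega) (by omega) (by omega), setCellAlt_eq]
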